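-- pv_equiv track=rewrite | github.com/scout719/adventOfCode | 2015/day15.py | day15_perms
-- ===== SOURCE A (Python) =====
-- from copy import deepcopy
--
-- def day15_perms(ingredients, total_ingredients):
--     curr = ingredients[0]
--     if len(ingredients) == 1:
--         res = []
--         for i in range(100 + 1):
--             res.append({curr: i})
--         return res
--
--     perms = day15_perms(ingredients[1:], total_ingredients)
--     res = []
--     for perm in perms:
--         remaining = 100 - sum(perm.values())
--         if len(ingredients) == total_ingredients:
--             new_perm = deepcopy(perm)
--             new_perm[curr] = remaining
--             res.append(new_perm)
--         else:
--             for i in range(remaining + 1):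
--                 new_perm = deepcopy(perm)
--                 new_perm[curr] = i
--                 res.append(new_perm)
--     return res
-- ===== SOURCE B (Python) =====
-- def day15_perms(ingredients, total_ingredients):
--     # Iterative rebuild of the recursion: start from the last ingredient's
--     # base level (all amounts 0..100) and expand front-to-back ingredients
--     # in reverse, tracking the suffix length in `count`.
--     *rest, last = ingredients
--     perms = [{last: i} for i in range(101)]
--     count = 1
--     for curr in reversed(rest):
--         count += 1
--         new_perms = []
--         for perm in perms:
--             remaining = 100 - sum(perm.values())
--             choices = [remaining] if count == total_ingredients else range(remaining + 1)
--             for i in choices: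
--                 new_perm = dict(perm)
--                 new_perm[curr] = i
--                 new_perms.append(new_perm)
--         perms = new_perms
--     return perms
-- ===== Notes on version B (the rewrite author's own statement) =====
-- stated objective: alternative
-- what changed: Replaces A's recursion over ingredient suffixes (with list slicing and deepcopy per level) by an explicit iterative build: a base level for the last ingredient and a loop over the remaining ingredients in reverse that expands the accumulated perms, tracking the suffix length in a counter.
import Mathlib
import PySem

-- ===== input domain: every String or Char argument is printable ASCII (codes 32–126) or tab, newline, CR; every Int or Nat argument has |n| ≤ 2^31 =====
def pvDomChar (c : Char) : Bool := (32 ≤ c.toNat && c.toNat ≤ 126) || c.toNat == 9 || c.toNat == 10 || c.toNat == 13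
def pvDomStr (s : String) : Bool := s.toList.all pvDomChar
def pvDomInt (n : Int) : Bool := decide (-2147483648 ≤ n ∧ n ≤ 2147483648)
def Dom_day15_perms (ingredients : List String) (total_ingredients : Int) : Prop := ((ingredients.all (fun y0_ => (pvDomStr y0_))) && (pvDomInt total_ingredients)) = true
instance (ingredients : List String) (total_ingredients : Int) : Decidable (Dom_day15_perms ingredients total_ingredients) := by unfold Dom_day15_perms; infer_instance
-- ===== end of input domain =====

-- B rebuilds A's recursion as an explicit iterative loop over the reversed ingredient list (alternative decomposition, same cost).

-- ===== PORT A =====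
-- 'new_perm = deepcopy(perm); new_perm[curr] = v' : dict copy-and-assign, on the association list
def pyDictSet (perm : List (String × Int)) (k : String) (v : Int) : List (String × Int) :=
  ((PySem.Dict.mk perm).insert k v).items

def day15_perms (ingredients : List String) (total_ingredients : Int) : List (List (String × Int)) :=
  match ingredients with
  | [] => []          -- Python raises IndexError on ingredients[0]; excluded by Pre_
  | [curr] =>
      (PySem.List.pyRange 0 101 1).foldl (fun res i => res ++ [[(curr, i)]]) []
  | curr :: rest =>
      let perms := day15_perms rest total_ingredients
      perms.foldl (fun res perm =>
        let remaining := 100 - (perm.map Prod.snd).sum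
        if ((rest.length : Int) + 1) = total_ingredients then
          res ++ [pyDictSet perm curr remaining]
        else
          (PySem.List.pyRange 0 (remaining + 1) 1).foldl
            (fun r i => r ++ [pyDictSet perm curr i]) res) []

-- ===== PORT B =====
def altBase (last : String) : List (List (String × Int)) :=
  (PySem.List.pyRange 0 101 1).map (fun i => [(last, i)])

-- one iteration of B's outer loop: state = (count, perms)
def altStep (total_ingredients : Int) (st : Int × List (List (String × Int))) (curr : String) :
    Int × List (List (String × Int)) :=
  let count := st.1 + 1
  let newPerms := st.2.foldl (fun acc perm =>
    let remaining := 100 - (perm.map Prod.snd).sum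
    let choices := if count = total_ingredients then [remaining]
                   else PySem.List.pyRange 0 (remaining + 1) 1
    choices.foldl (fun acc2 i => acc2 ++ [pyDictSet perm curr i]) acc) []
  (count, newPerms)

def day15_perms_alt (ingredients : List String) (total_ingredients : Int) : List (List (String × Int)) :=
  match ingredients.getLast? with
  | none => []        -- Python raises ValueError unpacking '*rest, last = []'; excluded by Pre_
  | some last =>
      (ingredients.dropLast.reverse.foldl (altStep total_ingredients) (1, altBase last)).2

-- ===== PRECONDITION & SPEC =====
-- Pre_ excludes only the empty list, on which both Pythons raise.
def Pre_day15_perms (ingredients : List String) (total_ingredients : Int) : Prop := ingredients ≠ []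
instance (ingredients : List String) (total_ingredients : Int) : Decidable (Pre_day15_perms ingredients total_ingredients) := by unfold Pre_day15_perms; infer_instance

def pvWitness_day15_perms : List String × Int := (["a", "b"], 2)

def Spec_day15_perms (ingredients : List String) (total_ingredients : Int) (out : List (List (String × Int))) : Prop := out = day15_perms_alt ingredients total_ingredients
instance (ingredients : List String) (total_ingredients : Int) (out : List (List (String × Int))) : Decidable (Spec_day15_perms ingredients total_ingredients out) := by unfold Spec_day15_perms; infer_instance

-- ===== CLAIM (what is proved, stated in full; the proofs are below) =====
def Claim_equal_day15_perms : Prop := ∀ (ingredients : List String) (total_ingredients : Int), Dom_day15_perms ingredients total_ingredients → Pre_day15_perms ingredients total_ingredients → Spec_day15_perms ingredients total_ingredients (day15_perms ingredients total_ingredients)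

-- ===== LEMMAS AND PROOFS =====

-- append-accumulating foldl is map
lemma foldl_append_map {α β : Type} (g : α → β) :
    ∀ (l : List α) (acc : List β), l.foldl (fun r x => r ++ [g x]) acc = acc ++ l.map g := by
  intro l
  induction l with
  | nil => simp
  | cons x xs ih => intro acc; simp [List.foldl, ih]

-- the first component of B's loop state counts processed ingredients
lemma fst_foldl_altStep (total : Int) :
    ∀ (l : List String) (st : Int × List (List (String × Int))),
      (l.foldl (altStep total) st).1 = st.1 + l.length := by
  intro l
  induction l with
  | nil => simp
  | cons x xs ih =>
      intro st
      simp [List.foldl, ih, altStep]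
      omega

-- B's step, expanded to A's inner-loop shape with the count made explicit
lemma altStep_snd (total cnt : Int) (curr : String) (perms : List (List (String × Int))) :
    (altStep total (cnt, perms) curr).2 =
      perms.foldl (fun res perm =>
        let remaining := 100 - (perm.map Prod.snd).sum
        if cnt + 1 = total then
          res ++ [pyDictSet perm curr remaining]
        else
          (PySem.List.pyRange 0 (remaining + 1) 1).foldl
            (fun r i => r ++ [pyDictSet perm curr i]) res) [] := by
  dsimp only [altStep]
  congr 1
  funext res perm
  by_cases h : cnt + 1 = total <;> simp [h]

-- main equivalence on nonempty lists
lemma day15_eq (total : Int) :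
    ∀ (ing : List String), ing ≠ [] → day15_perms ing total = day15_perms_alt ing total := by
  intro ing
  induction ing with
  | nil => intro h; exact absurd rfl h
  | cons x tail ih =>
      intro _
      cases tail with
      | nil =>
          simp only [day15_perms, day15_perms_alt, List.getLast?_singleton,
            List.dropLast_singleton, List.reverse_nil, List.foldl_nil]
          rw [foldl_append_map]
          simp [altBase]
      | cons y rest =>
          have htail : (y :: rest : List String) ≠ [] := by simp
          obtain ⟨last, hlast⟩ : ∃ l, (y :: rest : List String).getLast? = some l := by
            cases hgl : (y :: rest : List String).getLast? with
            | none => simp at hgl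
            | some l => exact ⟨l, rfl⟩
          -- unfold B on the tail and on the whole list
          have hBtail : day15_perms_alt (y :: rest) total =
              ((y :: rest : List String).dropLast.reverse.foldl (altStep total) (1, altBase last)).2 := by
            simp [day15_perms_alt, hlast]
          set S := ((y :: rest : List String).dropLast.reverse.foldl (altStep total) (1, altBase last)) with hS
          have hS1 : S.1 = ((y :: rest : List String).length : Int) := by
            rw [hS, fst_foldl_altStep]
            simp [List.length_dropLast]
            omega
          have hBfull : day15_perms_alt (x :: y :: rest) total = (altStep total S x).2 := by
            simp only [day15_perms_alt, List.getLast?_cons_cons, hlast, List.dropLast_cons_of_ne_nil htail,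
              List.reverse_cons, List.foldl_append, List.foldl_cons, List.foldl_nil, hS]
          rw [hBfull]
          have hSnd : S.2 = day15_perms (y :: rest) total := by
            rw [← hBtail]
            exact (ih htail).symm
          rw [show S = (S.1, S.2) from rfl, altStep_snd, hS1, hSnd]
          simp only [day15_perms]

-- ===== VERDICT (by name: the statement is the Claim_ definition above) =====
theorem day15_perms_spec : Claim_equal_day15_perms := by
  intro ing total _ hpre
  exact day15_eq total ing hpre
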